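-- pv_equiv track=rewrite | github.com/KhaledELG/ECN-OP | fonctions.py | DurationFormat
-- ===== SOURCE A (Python) =====
-- def DurationFormat(str):
--     my_str=[]
--     if str.find('h')!=-1:
--         time="hms"
--     elif str.find('m')!=-1:
--         time="ms"
--     else:
--         time="s"
--     for i in range (len(time)):
--         my_str.append(str.split(time[i])[0])
--         str=str.split(time[i])[1]
--
--     if len(my_str) == 1 :
--         if len(my_str[0])>1:
--             str='00:00:'+ my_str[0]
--         else: str='00:00:0'+my_str[0]
--     elif len(my_str) == 2 :
--         if len(my_str[0])>1 and len(my_str[1])>1: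
--             str= '00:' + my_str[0] + ':' + my_str[1]
--         elif len(my_str[0])>1 and len(my_str[1])<=1:
--             str= '00:' + my_str[0] + ':0' + my_str[1]
--         elif len(my_str[0])<=1 and len(my_str[1])>1:
--             str= '00:0' + my_str[0] + ':' + my_str[1]
--         else : str= '00:0' + my_str[0] + ':0' + my_str[1]
--     elif len(my_str) == 3 :
--         if len(my_str[0])>1 and len(my_str[1])>1 and len(my_str[2])>1:
--             str= my_str[0] + ':' + my_str[1] + ':' + my_str[2]
--         elif len(my_str[0])>1 and len(my_str[1])>1 and len(my_str[2])<=1: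
--             str= my_str[0] + ':' + my_str[1] + ':0' + my_str[2]
--         elif len(my_str[0])>1 and len(my_str[1])<=1 and len(my_str[2])>1:
--             str= my_str[0] + ':0' + my_str[1] + ':' + my_str[2]
--         elif len(my_str[0])>1 and len(my_str[1])<=1 and len(my_str[2])<=1:
--             str= my_str[0] + ':0' + my_str[1] + ':0' + my_str[2]
--         elif len(my_str[0])<=1 and len(my_str[1])>1 and len(my_str[2])>1:
--             str= '0' + my_str[0] + ':' + my_str[1] + ':' + my_str[2]
--         elif len(my_str[0])<=1 and len(my_str[1])>1 and len(my_str[2])<=1: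
--             str= '0' + my_str[0] + ':' + my_str[1] + ':0' + my_str[2]
--         elif len(my_str[0])<=1 and len(my_str[1])<=1 and len(my_str[2])>1:
--             str= '0' + my_str[0] + ':0' + my_str[1] + ':' + my_str[2]
--         else : str= '0' + my_str[0] + ':0' + my_str[1] + ':0' + my_str[2]
--     return str
-- ===== SOURCE B (Python) =====
-- def DurationFormat(str):
--     # single left-to-right character scan with a pending-units state machine;
--     # builds the output incrementally, closing (and padding) each field when
--     # its unit letter is reached.  Malformed durations (a pending unit letter
--     # never reached) are rejected with ValueError (A raises IndexError there).
--     units = "hms" if 'h' in str else ("ms" if 'm' in str else "s")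
--     out = "00:" * (3 - len(units))
--     buf = ""
--     for c in str:
--         if units and c == units[0]:
--             out += buf if len(buf) > 1 else '0' + buf
--             if len(units) > 1:
--                 out += ':'
--             units = units[1:]
--             buf = ""
--         else:
--             buf += c
--     if units:
--         raise ValueError("malformed duration: missing '%s'" % units[0])
--     return out
-- ===== Notes on version B (the rewrite author's own statement) =====
-- stated objective: simpler
-- what changed: B replaces A's staged repeated-split parsing plus 15-branch padding cascade by one left-to-right character scan with a pending-units state machine that buffers the current field and emits it padded when its unit letter is reached.
import Mathlib
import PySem

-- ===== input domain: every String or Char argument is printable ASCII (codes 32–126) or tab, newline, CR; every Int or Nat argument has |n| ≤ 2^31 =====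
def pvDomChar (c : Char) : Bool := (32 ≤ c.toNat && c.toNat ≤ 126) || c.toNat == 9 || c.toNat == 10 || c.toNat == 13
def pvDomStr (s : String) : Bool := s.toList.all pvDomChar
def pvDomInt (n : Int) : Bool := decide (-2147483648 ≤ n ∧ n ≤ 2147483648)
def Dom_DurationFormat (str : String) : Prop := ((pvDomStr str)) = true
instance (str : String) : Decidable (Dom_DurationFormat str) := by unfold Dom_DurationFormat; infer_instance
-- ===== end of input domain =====

-- B replaces A's repeated-split passes plus 15-branch padding cascade by a single
-- left-to-right character scan with a pending-units state machine (objective: simpler).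

-- ===== PORT A =====
-- A's loop 'for i in range(len(time)): my_str.append(str.split(time[i])[0]); str = str.split(time[i])[1]'
-- is the foldl below over the characters of `time`; 'split(c)[1]' is pyGet? … 1 (none = IndexError,
-- those inputs are excluded by Pre_; .getD [] is only the totalisation of the port).
def DurationFormat (str : String) : String :=
  let s0 := str.toList
  let time : List Char :=
    if PySem.Chars.find s0 ['h'] ≠ -1 then ['h', 'm', 's']
    else if PySem.Chars.find s0 ['m'] ≠ -1 then ['m', 's']
    else ['s']
  let st := time.foldl (fun (st : List (List Char) × List Char) (c : Char) =>
      (st.1 ++ [(PySem.List.pyGet? (PySem.Chars.splitOn st.2 [c]) 0).getD []],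
       (PySem.List.pyGet? (PySem.Chars.splitOn st.2 [c]) 1).getD [])) ([], s0)
  let my_str := st.1
  let e0 := (PySem.List.pyGet? my_str 0).getD []
  let e1 := (PySem.List.pyGet? my_str 1).getD []
  let e2 := (PySem.List.pyGet? my_str 2).getD []
  let r : List Char :=
    if my_str.length = 1 then
      if PySem.Chars.len e0 > 1 then ('0'::'0'::':'::'0'::'0'::':'::[]) ++ e0
      else ('0'::'0'::':'::'0'::'0'::':'::'0'::[]) ++ e0
    else if my_str.length = 2 then
      if PySem.Chars.len e0 > 1 ∧ PySem.Chars.len e1 > 1 then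
        ('0'::'0'::':'::[]) ++ e0 ++ (':'::[]) ++ e1
      else if PySem.Chars.len e0 > 1 ∧ PySem.Chars.len e1 ≤ 1 then
        ('0'::'0'::':'::[]) ++ e0 ++ (':'::'0'::[]) ++ e1
      else if PySem.Chars.len e0 ≤ 1 ∧ PySem.Chars.len e1 > 1 then
        ('0'::'0'::':'::'0'::[]) ++ e0 ++ (':'::[]) ++ e1
      else ('0'::'0'::':'::'0'::[]) ++ e0 ++ (':'::'0'::[]) ++ e1
    else if my_str.length = 3 then
      if PySem.Chars.len e0 > 1 ∧ PySem.Chars.len e1 > 1 ∧ PySem.Chars.len e2 > 1 then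
        e0 ++ (':'::[]) ++ e1 ++ (':'::[]) ++ e2
      else if PySem.Chars.len e0 > 1 ∧ PySem.Chars.len e1 > 1 ∧ PySem.Chars.len e2 ≤ 1 then
        e0 ++ (':'::[]) ++ e1 ++ (':'::'0'::[]) ++ e2
      else if PySem.Chars.len e0 > 1 ∧ PySem.Chars.len e1 ≤ 1 ∧ PySem.Chars.len e2 > 1 then
        e0 ++ (':'::'0'::[]) ++ e1 ++ (':'::[]) ++ e2
      else if PySem.Chars.len e0 > 1 ∧ PySem.Chars.len e1 ≤ 1 ∧ PySem.Chars.len e2 ≤ 1 then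
        e0 ++ (':'::'0'::[]) ++ e1 ++ (':'::'0'::[]) ++ e2
      else if PySem.Chars.len e0 ≤ 1 ∧ PySem.Chars.len e1 > 1 ∧ PySem.Chars.len e2 > 1 then
        ('0'::[]) ++ e0 ++ (':'::[]) ++ e1 ++ (':'::[]) ++ e2
      else if PySem.Chars.len e0 ≤ 1 ∧ PySem.Chars.len e1 > 1 ∧ PySem.Chars.len e2 ≤ 1 then
        ('0'::[]) ++ e0 ++ (':'::[]) ++ e1 ++ (':'::'0'::[]) ++ e2
      else if PySem.Chars.len e0 ≤ 1 ∧ PySem.Chars.len e1 ≤ 1 ∧ PySem.Chars.len e2 > 1 then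
        ('0'::[]) ++ e0 ++ (':'::'0'::[]) ++ e1 ++ (':'::[]) ++ e2
      else ('0'::[]) ++ e0 ++ (':'::'0'::[]) ++ e1 ++ (':'::'0'::[]) ++ e2
    else st.2
  String.ofList r

-- ===== PORT B =====
-- Source B's loop body: state = (pending units, output so far, current field buffer);
-- on the head pending unit the buffer is padded and emitted, otherwise the char is buffered.
def pvStep (st : List Char × List Char × List Char) (c : Char) :
    List Char × List Char × List Char :=
  match st.1 with
  | u :: rest =>
    if c = u then
      (rest,
       st.2.1 ++ (if PySem.Chars.len st.2.2 > 1 then st.2.2 else '0' :: st.2.2)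
             ++ (if rest.length ≥ 1 then [':'] else []),
       [])
    else (u :: rest, st.2.1, st.2.2 ++ [c])
  | [] => ([], st.2.1, st.2.2 ++ [c])

-- Source B finally raises ValueError when pending units remain (A raises IndexError there;
-- all such inputs lie outside Pre_): the port is totalised by returning the scanned output.
def DurationFormat_alt (str : String) : String :=
  let s0 := str.toList
  let units : List Char :=
    if PySem.Chars.isIn ['h'] s0 then ['h', 'm', 's']
    else if PySem.Chars.isIn ['m'] s0 then ['m', 's']
    else ['s']
  -- '"00:" * (3 - len(units))'
  let out0 := (List.replicate (3 - units.length) ['0', '0', ':']).flatten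
  let st := s0.foldl pvStep (units, out0, [])
  String.ofList st.2.1

-- ===== PRECONDITION & SPEC =====
-- pvBetween c s = the segment of s strictly between the first and second occurrence of c
-- (to the end if c occurs once); purely a shape description of the input, used by Pre_ only.
def pvTw (c : Char) (s : List Char) : List Char := s.takeWhile (fun x => x != c)
def pvRest (c : Char) (s : List Char) : List Char := (s.dropWhile (fun x => x != c)).tail
def pvBetween (c : Char) (s : List Char) : List Char := pvTw c (pvRest c s)

-- Pre_ = exactly the inputs where A's chained 'split(…)[1]' indexings all succeed (elsewhere
-- Python A raises IndexError): each next unit letter must occur in the segment the previous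
-- split left, i.e. between the first and second occurrence of the previous letter.
def Pre_DurationFormat (str : String) : Prop :=
  let s := str.toList
  if 'h' ∈ s then 'm' ∈ pvBetween 'h' s ∧ 's' ∈ pvBetween 'm' (pvBetween 'h' s)
  else if 'm' ∈ s then 's' ∈ pvBetween 'm' s
  else 's' ∈ s
instance (str : String) : Decidable (Pre_DurationFormat str) := by
  unfold Pre_DurationFormat; infer_instance

def pvWitness_DurationFormat : String := "1h2m3s"

def Spec_DurationFormat (str : String) (out : String) : Prop := out = DurationFormat_alt str
instance (str : String) (out : String) : Decidable (Spec_DurationFormat str out) := by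
  unfold Spec_DurationFormat; infer_instance

-- ===== CLAIM (what is proved, stated in full; the proofs are below) =====
def Claim_equal_DurationFormat : Prop :=
  ∀ (str : String), Dom_DurationFormat str → Pre_DurationFormat str →
    Spec_DurationFormat str (DurationFormat str)

-- ===== LEMMAS AND PROOFS =====

-- structural single-char split (proof-side only)
def pvSC (c : Char) : List Char → List (List Char)
  | [] => [[]]
  | x :: xs => if x = c then [] :: pvSC c xs else (pvSC c xs).modifyHead (x :: ·)

theorem pvSC_ne_nil (c : Char) (l : List Char) : pvSC c l ≠ [] := by
  induction l with
  | nil => simp [pvSC]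
  | cons x xs ih =>
    simp only [pvSC]
    split
    · simp
    · cases h : pvSC c xs with
      | nil => exact absurd h ih
      | cons p ps => simp

theorem pvSC_go (c : Char) (l : List Char) : ∀ (fuel : Nat) (cur : List Char)
    (acc : List (List Char)), l.length ≤ fuel →
    PySem.Chars.splitOn.go [c] fuel l cur acc =
      acc.reverse ++ (pvSC c l).modifyHead (cur.reverse ++ ·) := by
  induction l with
  | nil =>
    intro fuel cur acc _
    cases fuel <;> simp [PySem.Chars.splitOn.go, pvSC]
  | cons x xs ih =>
    intro fuel cur acc hf
    cases fuel with
    | zero => simp at hf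
    | succ f =>
      rw [PySem.Chars.splitOn.go]
      by_cases hx : x = c
      · subst hx
        simp only [List.isPrefixOf, beq_self_eq_true, Bool.true_and, List.length_cons,
          List.drop_succ_cons, List.length_nil, List.drop_zero]
        rw [ih f [] (cur.reverse :: acc) (by simpa using hf)]
        simp only [pvSC, List.reverse_cons, List.append_assoc, List.cons_append,
          List.nil_append]
        cases h2 : pvSC x xs <;> simp
      · have hbx : (([c] : List Char).isPrefixOf (x :: xs)) = false := by
          simp only [List.isPrefixOf, Bool.and_true]
          exact beq_eq_false_iff_ne.mpr (Ne.symm hx)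
        rw [if_neg (by simp [hbx])]
        rw [ih f (x :: cur) acc (by simpa using Nat.le_of_succ_le_succ hf)]
        simp only [pvSC, if_neg hx]
        cases h2 : pvSC c xs with
        | nil => exact absurd h2 (pvSC_ne_nil c xs)
        | cons p ps => simp

theorem pvSplitOn_eq_pvSC (c : Char) (l : List Char) :
    PySem.Chars.splitOn l [c] = pvSC c l := by
  unfold PySem.Chars.splitOn
  rw [pvSC_go c l (l.length + 1) [] [] (Nat.le_succ _)]
  cases h2 : pvSC c l with
  | nil => exact absurd h2 (pvSC_ne_nil c l)
  | cons p ps => simp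

theorem pvSC_eq (c : Char) (l : List Char) :
    pvSC c l = if c ∈ l then pvTw c l :: pvSC c (pvRest c l) else [l] := by
  induction l with
  | nil => simp [pvSC]
  | cons x xs ih =>
    by_cases hx : x = c
    · subst hx
      simp [pvSC, pvTw, pvRest, List.takeWhile, List.dropWhile]
    · have hne : (x != c) = true := bne_iff_ne.mpr hx
      by_cases hm : c ∈ xs
      · have hml : c ∈ x :: xs := List.mem_cons_of_mem _ hm
        rw [if_pos hml]
        have htw : pvTw c (x :: xs) = x :: pvTw c xs := by
          simp [pvTw, List.takeWhile, hne]
        have hrs : pvRest c (x :: xs) = pvRest c xs := by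
          simp [pvRest, List.dropWhile, hne]
        rw [htw, hrs]
        simp only [pvSC, if_neg hx, ih, if_pos hm, List.modifyHead_cons]
      · have hml : c ∉ x :: xs := by simp [hm]; exact fun h => absurd h.symm hx
        rw [if_neg hml]
        simp only [pvSC, if_neg hx, ih, if_neg hm, List.modifyHead_cons]

-- decomposition at the first occurrence
theorem pvDropWhile_cons (c : Char) (l : List Char) (h : c ∈ l) :
    l.dropWhile (fun x => x != c) = c :: pvRest c l := by
  induction l with
  | nil => simp at h
  | cons x xs ih =>
    by_cases hx : x = c
    · subst hx; simp [pvRest, List.dropWhile]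
    · have hne : (x != c) = true := bne_iff_ne.mpr hx
      have hm : c ∈ xs := by
        rcases List.mem_cons.mp h with h1 | h1
        · exact absurd h1.symm hx
        · exact h1
      simp only [pvRest, List.dropWhile, hne]
      exact ih hm

theorem pvDecomp (c : Char) (l : List Char) (h : c ∈ l) :
    l = pvTw c l ++ c :: pvRest c l := by
  conv_lhs => rw [← List.takeWhile_append_dropWhile (p := fun x => x != c) (l := l)]
  rw [pvDropWhile_cons c l h]
  rfl

-- the first occurrence of c in any extension of p lies inside p
theorem pvTw_append (c : Char) (p r : List Char) (h : c ∈ p) :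
    pvTw c (p ++ r) = pvTw c p := by
  have hlen : (pvTw c p).length + (c :: pvRest c p).length = p.length := by
    rw [← List.length_append, ← pvDecomp c p h]
  have hlt : (p.takeWhile (fun x => x != c)).length ≠ p.length := by
    simp only [pvTw, List.length_cons] at hlen
    omega
  simp [pvTw, List.takeWhile_append, hlt]

theorem pvRest_append (c : Char) (p r : List Char) (h : c ∈ p) :
    pvRest c (p ++ r) = pvRest c p ++ r := by
  have hd := pvDropWhile_cons c p h
  rw [pvRest, List.dropWhile_append]
  rw [hd]
  simp [pvRest]

theorem pvTw_prefix_eq (c : Char) (p s : List Char) (hp : p <+: s) (h : c ∈ p) :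
    pvTw c s = pvTw c p := by
  obtain ⟨r, rfl⟩ := hp
  exact pvTw_append c p r h

theorem pvRest_prefix (c : Char) (p s : List Char) (hp : p <+: s) (h : c ∈ p) :
    ∃ r, pvRest c s = pvRest c p ++ r := by
  obtain ⟨r, rfl⟩ := hp
  exact ⟨r, pvRest_append c p r h⟩

theorem pvTw_not_mem (c : Char) (l : List Char) (h : c ∉ l) : pvTw c l = l := by
  simp only [pvTw, List.takeWhile_eq_self_iff]
  intro x hx
  exact bne_iff_ne.mpr (fun he => h (he ▸ hx))

theorem pvSplit0 (c : Char) (a : List Char) :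
    (PySem.List.pyGet? (PySem.Chars.splitOn a [c]) 0).getD [] = pvTw c a := by
  rw [pvSplitOn_eq_pvSC, pvSC_eq]
  by_cases h : c ∈ a
  · rw [if_pos h]
    simp [PySem.List.pyGet?, PySem.List.pyIdx?]
  · rw [if_neg h, pvTw_not_mem c a h]
    simp [PySem.List.pyGet?, PySem.List.pyIdx?]

theorem pvSplit1 (c : Char) (a : List Char) (h : c ∈ a) :
    (PySem.List.pyGet? (PySem.Chars.splitOn a [c]) 1).getD [] = pvBetween c a := by
  rw [pvSplitOn_eq_pvSC, pvSC_eq, if_pos h, pvSC_eq]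
  by_cases h2 : c ∈ pvRest c a
  · rw [if_pos h2]
    simp [PySem.List.pyGet?, PySem.List.pyIdx?, pvBetween]
  · rw [if_neg h2]
    simp [PySem.List.pyGet?, PySem.List.pyIdx?, pvBetween, pvTw_not_mem c _ h2]

-- B's scan: closing one field.  While the head pending unit u occurs in l, scanning l
-- first buffers pvTw u l, then emits the padded field (with a ':' if more units remain)
-- and continues on pvRest u l with an empty buffer.
theorem pvScan_close (u : Char) (rest out buf l : List Char) (h : u ∈ l) :
    List.foldl pvStep (u :: rest, out, buf) l =
      List.foldl pvStep
        (rest,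
         out ++ (if PySem.Chars.len (buf ++ pvTw u l) > 1 then buf ++ pvTw u l
                 else '0' :: (buf ++ pvTw u l))
             ++ (if rest.length ≥ 1 then [':'] else []),
         []) (pvRest u l) := by
  induction l generalizing buf with
  | nil => simp at h
  | cons x xs ih =>
    by_cases hx : x = u
    · subst hx
      simp only [List.foldl_cons, pvStep]
      have htw : pvTw x (x :: xs) = [] := by simp [pvTw, List.takeWhile]
      have hrs : pvRest x (x :: xs) = xs := by simp [pvRest, List.dropWhile]
      rw [htw, hrs]
      simp
    · have hne : (x != u) = true := bne_iff_ne.mpr hx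
      have hm : u ∈ xs := by
        rcases List.mem_cons.mp h with h1 | h1
        · exact absurd h1.symm hx
        · exact h1
      have htw : pvTw u (x :: xs) = x :: pvTw u xs := by
        simp [pvTw, List.takeWhile, hne]
      have hrs : pvRest u (x :: xs) = pvRest u xs := by
        simp [pvRest, List.dropWhile, hne]
      rw [htw, hrs]
      simp only [List.foldl_cons, pvStep]
      rw [if_neg (fun he => hx he)]
      rw [ih (buf ++ [x]) hm]
      simp

-- B's scan with no pending units never changes the output
theorem pvScan_nil (out buf l : List Char) :
    (List.foldl pvStep ([], out, buf) l).2.1 = out := by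
  induction l generalizing buf with
  | nil => rfl
  | cons x xs ih => simpa [pvStep] using ih (buf ++ [x])

-- ===== VERDICT (by name: the statement is the Claim_ definition above) =====
set_option maxHeartbeats 1600000 in
theorem DurationFormat_spec : Claim_equal_DurationFormat := by
  intro str _ hpre
  show DurationFormat str = DurationFormat_alt str
  unfold Pre_DurationFormat at hpre
  simp only at hpre
  unfold DurationFormat DurationFormat_alt
  simp only []
  by_cases hh : 'h' ∈ str.toList
  · rw [if_pos hh] at hpre
    obtain ⟨hm, hs3⟩ := hpre
    have hfh : PySem.Chars.find str.toList ['h'] ≠ -1 := by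
      rw [Ne, PySem.Chars.find_eq_neg_one_iff]
      simp [List.singleton_infix_iff, hh]
    have hih : PySem.Chars.isIn ['h'] str.toList = true :=
      (PySem.Chars.isIn_iff_infix _ _).mpr ((List.singleton_infix_iff _ _).mpr hh)
    rw [if_pos hfh, if_pos hih]
    simp only [List.foldl_cons, List.foldl_nil]
    rw [pvSplit0 'h' str.toList, pvSplit1 'h' str.toList hh]
    have hpref1 : pvBetween 'h' str.toList <+: pvRest 'h' str.toList := by
      unfold pvBetween pvTw
      exact List.takeWhile_prefix _
    have hmb1 : 'm' ∈ pvRest 'h' str.toList := hpref1.subset hm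
    obtain ⟨r2, hr2⟩ := pvRest_prefix 'm' _ _ hpref1 hm
    have hpref2 : pvBetween 'm' (pvBetween 'h' str.toList) <+:
        pvRest 'm' (pvRest 'h' str.toList) := by
      rw [hr2]
      refine List.IsPrefix.trans ?_ ⟨r2, rfl⟩
      unfold pvBetween pvTw
      exact List.takeWhile_prefix _
    have hsb2 : 's' ∈ pvRest 'm' (pvRest 'h' str.toList) := hpref2.subset hs3
    rw [pvSplit0 'm' _, pvSplit1 'm' _ hm, pvSplit0 's' _]
    rw [pvScan_close 'h' ['m','s'] _ [] _ hh,
        pvScan_close 'm' ['s'] _ [] _ hmb1,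
        pvScan_close 's' [] _ [] _ hsb2,
        pvScan_nil]
    rw [pvTw_prefix_eq 'm' _ _ hpref1 hm,
        pvTw_prefix_eq 's' _ _ hpref2 hs3]
    simp only [List.nil_append]
    generalize pvTw 's' (pvBetween 'm' (pvBetween 'h' str.toList)) = z
    generalize pvTw 'm' (pvBetween 'h' str.toList) = y
    generalize pvTw 'h' str.toList = x
    simp only [List.length_cons, List.length_nil, Nat.reduceAdd,
      Nat.sub_self, List.replicate_zero, List.flatten_nil, List.nil_append, ge_iff_le,
      Nat.one_le_iff_ne_zero, ne_eq, Nat.succ_ne_zero, not_false_eq_true]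
    simp only [PySem.List.pyGet?, PySem.List.pyIdx?]
    simp only [show ((2 : Int).toNat) = 2 from rfl, show ((1 : Int).toNat) = 1 from rfl,
      show ((0 : Int).toNat) = 0 from rfl]
    norm_num
    split_ifs <;> first | rfl | omega | simp [← String.ofList_append]
  · rw [if_neg hh] at hpre
    have hfh : ¬ PySem.Chars.find str.toList ['h'] ≠ -1 := by
      simp only [Ne, not_not, PySem.Chars.find_eq_neg_one_iff, List.singleton_infix_iff]
      exact hh
    have hih : ¬ PySem.Chars.isIn ['h'] str.toList = true := by
      simp only [PySem.Chars.isIn_iff_infix, List.singleton_infix_iff]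
      exact hh
    rw [if_neg hfh, if_neg hih]
    by_cases hm : 'm' ∈ str.toList
    · rw [if_pos hm] at hpre
      have hfm : PySem.Chars.find str.toList ['m'] ≠ -1 := by
        rw [Ne, PySem.Chars.find_eq_neg_one_iff]
        simp [List.singleton_infix_iff, hm]
      have him : PySem.Chars.isIn ['m'] str.toList = true :=
        (PySem.Chars.isIn_iff_infix _ _).mpr ((List.singleton_infix_iff _ _).mpr hm)
      rw [if_pos hfm, if_pos him]
      simp only [List.foldl_cons, List.foldl_nil]
      rw [pvSplit0 'm' str.toList, pvSplit1 'm' str.toList hm]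
      have hpref1 : pvBetween 'm' str.toList <+: pvRest 'm' str.toList := by
        unfold pvBetween pvTw
        exact List.takeWhile_prefix _
      have hsb1 : 's' ∈ pvRest 'm' str.toList := hpref1.subset hpre
      rw [pvSplit0 's' _]
      rw [pvScan_close 'm' ['s'] _ [] _ hm,
          pvScan_close 's' [] _ [] _ hsb1,
          pvScan_nil]
      rw [pvTw_prefix_eq 's' _ _ hpref1 hpre]
      simp only [List.nil_append]
      generalize pvTw 's' (pvBetween 'm' str.toList) = y
      generalize pvTw 'm' str.toList = x
      simp only [List.length_cons, List.length_nil, Nat.reduceAdd,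
        Nat.reduceSub, List.replicate_succ, List.replicate_zero, List.flatten_cons,
        List.flatten_nil, ge_iff_le]
      simp only [PySem.List.pyGet?, PySem.List.pyIdx?]
      simp only [show ((1 : Int).toNat) = 1 from rfl, show ((0 : Int).toNat) = 0 from rfl]
      norm_num
      split_ifs <;> first | rfl | omega
    · rw [if_neg hm] at hpre
      have hfm : ¬ PySem.Chars.find str.toList ['m'] ≠ -1 := by
        simp only [Ne, not_not, PySem.Chars.find_eq_neg_one_iff, List.singleton_infix_iff]
        exact hm
      have him : ¬ PySem.Chars.isIn ['m'] str.toList = true := by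
        simp only [PySem.Chars.isIn_iff_infix, List.singleton_infix_iff]
        exact hm
      rw [if_neg hfm, if_neg him]
      simp only [List.foldl_cons, List.foldl_nil]
      rw [pvSplit0 's' str.toList]
      rw [pvScan_close 's' [] _ [] _ hpre, pvScan_nil]
      simp only [List.nil_append]
      generalize pvTw 's' str.toList = x
      simp only [List.length_cons, List.length_nil, Nat.reduceAdd,
        Nat.reduceSub, List.replicate_succ, List.replicate_zero, List.flatten_cons,
        List.flatten_nil, ge_iff_le]
      simp only [PySem.List.pyGet?, PySem.List.pyIdx?]
      simp only [show ((0 : Int).toNat) = 0 from rfl]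
      norm_num
      split_ifs <;> rfl
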